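-- pv_equiv track=rewrite | github.com/revilofe/revilofe.github.io | docs/section1/u03/practica/otrosRecursos/examenes/2425 - pruebaClase/solucion/practica2_censo.py | agrupar_personas_por_edad
-- ===== SOURCE A (Python) =====
-- def agrupar_personas_por_edad(datos: list) -> dict:
--     """
--     Agrupa las personas por edad.
--
--     Args:
--         datos (list): Lista de diccionarios con los datos del censo.
--
--     Returns:
--         dict: Diccionario con las edades como claves y conjuntos de nombres como valores.
--     """
--     personas_por_edad = {}
--     for persona in datos:
--         edad = persona["edad"]
--         if edad not in personas_por_edad:
--             personas_por_edad[edad] = set()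
--         personas_por_edad[edad].add(persona["nombre"])
--     return personas_por_edad
-- ===== SOURCE B (Python) =====
-- def agrupar_personas_por_edad(datos: list) -> dict:
--     """Two-pass grouped comprehension: ordered dedup of ages, then one set
--     comprehension per age — instead of A's incremental dict-of-sets bucketing."""
--     edades = list(dict.fromkeys(p["edad"] for p in datos))
--     return {edad: {p["nombre"] for p in datos if p["edad"] == edad}
--             for edad in edades}
-- ===== Notes on version B (the rewrite author's own statement) =====
-- stated objective: alternative
-- what changed: B replaces A's single-pass incremental dict-of-sets bucketing with a two-pass grouped comprehension: first an ordered dedup of the ages, then one set comprehension per distinct age scanning the whole list.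
import Mathlib
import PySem

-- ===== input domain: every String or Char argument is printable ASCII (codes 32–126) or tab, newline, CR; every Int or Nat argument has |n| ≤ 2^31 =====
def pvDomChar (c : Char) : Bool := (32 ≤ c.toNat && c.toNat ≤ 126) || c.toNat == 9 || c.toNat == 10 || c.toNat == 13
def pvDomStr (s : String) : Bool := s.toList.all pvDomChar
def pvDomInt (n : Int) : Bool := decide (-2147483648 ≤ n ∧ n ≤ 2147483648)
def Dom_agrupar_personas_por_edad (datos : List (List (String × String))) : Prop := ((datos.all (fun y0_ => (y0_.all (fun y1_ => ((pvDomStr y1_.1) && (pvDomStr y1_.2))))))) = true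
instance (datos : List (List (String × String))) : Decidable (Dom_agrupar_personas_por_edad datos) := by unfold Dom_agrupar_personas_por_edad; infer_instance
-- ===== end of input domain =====

-- B replaces A's incremental dict-of-sets bucketing with a two-pass grouped
-- comprehension (ordered dedup of ages, then one set comprehension per age);
-- alternative decomposition, same results.


-- persona[k] : first-match lookup in the association list; total form, exact under Pre_ (key present)
def pvLook (p : List (String × String)) (k : String) : String :=
  ((PySem.Dict.mk p).get? k).getD ""

-- ===== PORT A =====
def agrupar_personas_por_edad (datos : List (List (String × String))) : List (String × List String) :=
  (datos.foldl
    (fun personas_por_edad persona =>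
      let edad := pvLook persona "edad"
      let d := if personas_por_edad.contains edad then personas_por_edad
               else personas_por_edad.insert edad PySem.Set.empty
      d.modify edad PySem.Set.empty (fun s => PySem.Set.add s (pvLook persona "nombre")))
    PySem.Dict.empty).items

-- ===== PORT B =====
def agrupar_personas_por_edad_alt (datos : List (List (String × String))) : List (String × List String) :=
  let edades : List String := PySem.List.dedup (datos.map (fun p => pvLook p "edad"))
  edades.map (fun edad =>
    (edad, PySem.Set.ofList
      ((datos.filter (fun p => pvLook p "edad" == edad)).map (fun p => pvLook p "nombre"))))

-- ===== PRECONDITION & SPEC =====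
-- Pre_: every persona dict has the keys "edad" and "nombre" (otherwise Python A raises KeyError)
def Pre_agrupar_personas_por_edad (datos : List (List (String × String))) : Prop :=
  (datos.all (fun p => (p.map Prod.fst).contains "edad" && (p.map Prod.fst).contains "nombre")) = true
instance (datos : List (List (String × String))) : Decidable (Pre_agrupar_personas_por_edad datos) := by unfold Pre_agrupar_personas_por_edad; infer_instance
def pvWitness_agrupar_personas_por_edad : (List (List (String × String))) :=
  [[("nombre", "Ana"), ("edad", "30")], [("nombre", "Luis"), ("edad", "30")]]
def Spec_agrupar_personas_por_edad (datos : List (List (String × String))) (out : List (String × List String)) : Prop := out = agrupar_personas_por_edad_alt datos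
instance (datos : List (List (String × String))) (out : List (String × List String)) : Decidable (Spec_agrupar_personas_por_edad datos out) := by unfold Spec_agrupar_personas_por_edad; infer_instance

-- ===== CLAIM (what is proved, stated in full; the proofs are below) =====
def Claim_equal_agrupar_personas_por_edad : Prop := ∀ (datos : List (List (String × String))), Dom_agrupar_personas_por_edad datos → Pre_agrupar_personas_por_edad datos → Spec_agrupar_personas_por_edad datos (agrupar_personas_por_edad datos)

-- ===== LEMMAS AND PROOFS =====

-- A's loop body, named for the proofs
def pvStep (d : PySem.Dict String (PySem.Set String)) (persona : List (String × String)) :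
    PySem.Dict String (PySem.Set String) :=
  let edad := pvLook persona "edad"
  let d' := if d.contains edad then d else d.insert edad PySem.Set.empty
  d'.modify edad PySem.Set.empty (fun s => PySem.Set.add s (pvLook persona "nombre"))

theorem pvStep_keys (d : PySem.Dict String (PySem.Set String)) (p : List (String × String)) :
    (pvStep d p).keys = PySem.Set.add d.keys (pvLook p "edad") := by
  unfold pvStep
  by_cases h : d.contains (pvLook p "edad") = true
  · simp only [h, if_true, PySem.Dict.keys_modify]
    rw [PySem.Dict.keys_insert_of_contains _ _ h,
        PySem.Set.add_of_mem ((PySem.Dict.contains_iff_mem_keys d _).mp h)]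
  · have h' : d.contains (pvLook p "edad") = false := by simpa using h
    simp only [h', Bool.false_eq_true, if_false, PySem.Dict.keys_modify]
    rw [PySem.Dict.keys_insert_of_contains _ _ (PySem.Dict.contains_insert_self d _ _),
        PySem.Dict.keys_insert_of_not_contains d _ h',
        PySem.Set.add_of_not_mem (fun hm => by
          simp [(PySem.Dict.contains_iff_mem_keys d _).mpr hm] at h')]

theorem pvStep_getD_self (d : PySem.Dict String (PySem.Set String)) (p : List (String × String)) :
    (pvStep d p).getD (pvLook p "edad") PySem.Set.empty
      = PySem.Set.add (d.getD (pvLook p "edad") PySem.Set.empty) (pvLook p "nombre") := by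
  unfold pvStep
  by_cases h : d.contains (pvLook p "edad") = true
  · simp only [h, if_true, PySem.Dict.getD_modify_self]
  · have h' : d.contains (pvLook p "edad") = false := by simpa using h
    simp only [h', Bool.false_eq_true, if_false, PySem.Dict.getD_modify_self]
    rw [PySem.Dict.getD_insert_self, PySem.Dict.getD_of_not_contains d _ h']

theorem pvStep_getD_ne (d : PySem.Dict String (PySem.Set String)) (p : List (String × String))
    (e : String) (hne : e ≠ pvLook p "edad") :
    (pvStep d p).getD e PySem.Set.empty = d.getD e PySem.Set.empty := by
  unfold pvStep
  by_cases h : d.contains (pvLook p "edad") = true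
  · simp only [h, if_true, PySem.Dict.getD_modify_of_ne _ _ _ hne]
  · have h' : d.contains (pvLook p "edad") = false := by simpa using h
    simp only [h', Bool.false_eq_true, if_false, PySem.Dict.getD_modify_of_ne _ _ _ hne]
    exact PySem.Dict.getD_insert_of_ne _ _ _ hne

theorem pvState_keys (l : List (List (String × String))) :
    (l.foldl pvStep PySem.Dict.empty).keys = PySem.Set.ofList (l.map (fun p => pvLook p "edad")) := by
  induction l using List.reverseRecOn with
  | nil => simp [PySem.Dict.keys_empty, PySem.Set.ofList]
  | append_singleton l p ih =>
      rw [List.foldl_append, List.foldl_cons, List.foldl_nil, pvStep_keys, ih,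
          List.map_append]
      simp only [List.map_cons, List.map_nil]
      rw [PySem.Set.ofList_append_singleton]

theorem pvState_getD (l : List (List (String × String))) (e : String) :
    (l.foldl pvStep PySem.Dict.empty).getD e PySem.Set.empty
      = PySem.Set.ofList ((l.filter (fun p => pvLook p "edad" == e)).map (fun p => pvLook p "nombre")) := by
  induction l using List.reverseRecOn with
  | nil => simp [PySem.Dict.getD_empty, PySem.Set.ofList]
  | append_singleton l p ih =>
      rw [List.foldl_append, List.foldl_cons, List.foldl_nil, List.filter_append]
      by_cases he : pvLook p "edad" = e
      · subst he
        rw [pvStep_getD_self, ih]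
        simp only [List.filter_cons, List.filter_nil, beq_self_eq_true, if_true,
          List.map_append, List.map_cons, List.map_nil]
        rw [PySem.Set.ofList_append_singleton]
      · have hb : (pvLook p "edad" == e) = false := by simpa using he
        rw [pvStep_getD_ne _ _ _ (fun hh => he hh.symm), ih]
        simp [hb]

-- ===== VERDICT (by name: the statement is the Claim_ definition above) =====
theorem agrupar_personas_por_edad_spec : Claim_equal_agrupar_personas_por_edad := by
  intro datos _ _
  unfold Spec_agrupar_personas_por_edad agrupar_personas_por_edad agrupar_personas_por_edad_alt
  show (datos.foldl pvStep PySem.Dict.empty).items = _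
  have hnd : (datos.foldl pvStep PySem.Dict.empty).keys.Nodup := by
    rw [pvState_keys]; exact PySem.Set.nodup_ofList _
  rw [PySem.Dict.items_eq_map_keys _ hnd PySem.Set.empty, pvState_keys, PySem.List.dedup_eq_ofList]
  exact List.map_congr_left (fun e _ => by rw [pvState_getD])
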